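-- pv_equiv track=rewrite | github.com/CS-liujf/cs240 | problem1.py | lookupAtJunction
-- ===== SOURCE A (Python) =====
-- pattern = 'wbwbwwbwbwbw'
--
-- p_length = len(pattern)
--
-- def lookupAtJunction(length: int, w: int, b: int) -> bool:
--     if length > p_length:
--         return False
--
--     w_num, b_num = 0, 0
--     for i in range(length+1):
--         # lookup the forward part
--         for j in range(-1, -1-i, -1):
--             if pattern[j] == 'w':
--                 w_num += 1
--             else:
--                 b_num += 1
--         # lookup the backward part
--         for j in range(0, length-i):
--             if pattern[j] == 'w':
--                 w_num += 1
--             else: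
--                 b_num += 1
--
--         if w_num == w and b_num == b:
--             return True
--
--     return False
-- ===== SOURCE B (Python) =====
-- pattern = 'wbwbwwbwbwbw'
--
-- p_length = len(pattern)
--
-- def lookupAtJunction(length: int, w: int, b: int) -> bool:
--     if length > p_length:
--         return False
--     # prefix/suffix 'w'-count tables over the fixed pattern; black counts follow by complement
--     wpre = [pattern[:k].count('w') for k in range(p_length + 1)]
--     wsuf = [pattern[p_length - k:].count('w') for k in range(p_length + 1)]
--     w_num, b_num = 0, 0
--     for i in range(length + 1):
--         dw = wsuf[i] + wpre[length - i]
--         w_num += dw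
--         b_num += length - dw
--         if w_num == w and b_num == b:
--             return True
--     return False
-- ===== Notes on version B (the rewrite author's own statement) =====
-- stated objective: alternative
-- what changed: Replaces the two inner character-scanning loops by precomputed prefix/suffix 'w'-count tables over the fixed pattern, deriving the black increment as length minus the white increment (complement), while keeping the cross-iteration accumulation and early return.
import Mathlib
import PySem

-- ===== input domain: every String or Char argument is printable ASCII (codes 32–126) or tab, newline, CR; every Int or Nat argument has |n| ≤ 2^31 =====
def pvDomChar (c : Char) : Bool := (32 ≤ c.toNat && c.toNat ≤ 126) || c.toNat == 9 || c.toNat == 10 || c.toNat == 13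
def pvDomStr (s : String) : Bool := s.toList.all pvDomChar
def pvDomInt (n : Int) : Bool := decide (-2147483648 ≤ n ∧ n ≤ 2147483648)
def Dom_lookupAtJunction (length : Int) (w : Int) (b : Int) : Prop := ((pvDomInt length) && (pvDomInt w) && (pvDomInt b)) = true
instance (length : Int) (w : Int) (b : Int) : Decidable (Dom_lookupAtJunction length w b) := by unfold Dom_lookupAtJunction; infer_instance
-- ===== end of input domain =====

-- B replaces A's per-iteration character scans by precomputed prefix/suffix 'w'-count tables
-- (black increment = length minus white increment); same accumulation and early return (objective: alternative).


-- ===== PORT A =====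
def pvPattern : String := "wbwbwwbwbwbw"
def pvPLength : Int := PySem.Str.len pvPattern

-- one character inspection of A's inner loops; the index is always in range on reachable
-- inputs (0 ≤ i ≤ length ≤ 12), so the 'none' (IndexError) branch is never taken
def pvAStep (s : Int × Int) (j : Int) : Int × Int :=
  if PySem.Str.pyGet? pvPattern j = some 'w' then (s.1 + 1, s.2) else (s.1, s.2 + 1)

def pvALoop (length w b : Int) : List Int → Int → Int → Bool
  | [], _, _ => false
  | i :: rest, wn, bn =>
    -- forward part: pattern[j] for j in range(-1, -1-i, -1)
    let s1 := (PySem.List.pyRange (-1) (-1 - i) (-1)).foldl pvAStep (wn, bn)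
    -- backward part: pattern[j] for j in range(0, length-i)
    let s2 := (PySem.List.pyRange 0 (length - i) 1).foldl pvAStep s1
    if s2.1 == w && s2.2 == b then true else pvALoop length w b rest s2.1 s2.2

def lookupAtJunction (length : Int) (w : Int) (b : Int) : Bool :=
  if length > pvPLength then false
  else pvALoop length w b (PySem.List.pyRange 0 (length + 1) 1) 0 0

-- ===== PORT B =====
-- wpre[k] = pattern[:k].count('w');  wsuf[k] = pattern[p_length-k:].count('w')
-- (ported through toList: for 0 ≤ k ≤ p_length the prefix slice pattern[:k] is 'take k',
-- the suffix slice pattern[p_length-k:] is 'drop (p_length-k)', and counting the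
-- one-character substring 'w' is counting the character 'w' — exact on these inputs)
def pvChars : List Char := pvPattern.toList
def pvWpre : List Int :=
  (PySem.List.pyRange 0 (pvPLength + 1) 1).map
    (fun k => ((pvChars.take k.toNat).count 'w' : Int))
def pvWsuf : List Int :=
  (PySem.List.pyRange 0 (pvPLength + 1) 1).map
    (fun k => ((pvChars.drop (pvPLength - k).toNat).count 'w' : Int))

def pvBLoop (length w b : Int) : List Int → Int → Int → Bool
  | [], _, _ => false
  | i :: rest, wn, bn =>
    -- table indices satisfy 0 ≤ i ≤ length ≤ 12, so the default of pyGetD is never used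
    let dw := PySem.List.pyGetD pvWsuf i 0 + PySem.List.pyGetD pvWpre (length - i) 0
    let wn' := wn + dw
    let bn' := bn + (length - dw)
    if wn' == w && bn' == b then true else pvBLoop length w b rest wn' bn'

def lookupAtJunction_alt (length : Int) (w : Int) (b : Int) : Bool :=
  if length > pvPLength then false
  else pvBLoop length w b (PySem.List.pyRange 0 (length + 1) 1) 0 0

-- ===== PRECONDITION & SPEC =====
def Spec_lookupAtJunction (length : Int) (w : Int) (b : Int) (out : Bool) : Prop := out = lookupAtJunction_alt length w b
instance (length : Int) (w : Int) (b : Int) (out : Bool) : Decidable (Spec_lookupAtJunction length w b out) := by unfold Spec_lookupAtJunction; infer_instance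

-- ===== CLAIM (what is proved, stated in full; the proofs are below) =====
def Claim_equal_lookupAtJunction : Prop := ∀ (length : Int) (w : Int) (b : Int), Dom_lookupAtJunction length w b → Spec_lookupAtJunction length w b (lookupAtJunction length w b)

-- ===== LEMMAS AND PROOFS =====

-- A's counting step only ever ADDS to the state, so a fold shifts by the fold from (0,0)
theorem pvAStep_shift (l : List Int) (wn bn : Int) :
    l.foldl pvAStep (wn, bn) =
      (wn + (l.foldl pvAStep (0, 0)).1, bn + (l.foldl pvAStep (0, 0)).2) := by
  have key : ∀ (l : List Int) (a c wn bn : Int),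
      l.foldl pvAStep (wn + a, bn + c) =
        (wn + (l.foldl pvAStep (a, c)).1, bn + (l.foldl pvAStep (a, c)).2) := by
    intro l
    induction l with
    | nil => intro a c wn bn; rfl
    | cons j rest ih =>
      intro a c wn bn
      simp only [List.foldl_cons]
      unfold pvAStep
      split_ifs <;> simpa [add_assoc] using ih _ _ wn bn
  simpa using key l 0 0 wn bn

-- per-iteration increments agree: A's two scans add exactly B's table values
theorem pvInc_eq (length i : Int) (h0 : 0 ≤ i) (h1 : i ≤ length) (h2 : length ≤ 12) :
    ((PySem.List.pyRange (-1) (-1 - i) (-1)).foldl pvAStep (0, 0)).1 +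
      ((PySem.List.pyRange 0 (length - i) 1).foldl pvAStep (0, 0)).1 =
      PySem.List.pyGetD pvWsuf i 0 + PySem.List.pyGetD pvWpre (length - i) 0 ∧
    ((PySem.List.pyRange (-1) (-1 - i) (-1)).foldl pvAStep (0, 0)).2 +
      ((PySem.List.pyRange 0 (length - i) 1).foldl pvAStep (0, 0)).2 =
      length - (PySem.List.pyGetD pvWsuf i 0 + PySem.List.pyGetD pvWpre (length - i) 0) := by
  have h0' : (0 : Int) ≤ length := le_trans h0 h1
  interval_cases length <;> interval_cases i <;> exact ⟨by decide, by decide⟩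

theorem pvLoop_eq (length w b : Int) (hlen : length ≤ 12) (l : List Int)
    (hmem : ∀ i ∈ l, 0 ≤ i ∧ i ≤ length) (wn bn : Int) :
    pvALoop length w b l wn bn = pvBLoop length w b l wn bn := by
  induction l generalizing wn bn with
  | nil => rfl
  | cons i rest ih =>
    obtain ⟨h0, h1⟩ := hmem i (List.mem_cons_self ..)
    have hrest : ∀ j ∈ rest, 0 ≤ j ∧ j ≤ length := fun j hj => hmem j (List.mem_cons_of_mem _ hj)
    have h := pvInc_eq length i h0 h1 hlen
    simp only [pvALoop, pvBLoop]
    rw [pvAStep_shift, pvAStep_shift]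
    rw [add_assoc wn, add_assoc bn, h.1, h.2]
    split
    · rfl
    · exact ih hrest _ _

-- ===== VERDICT (by name: the statement is the Claim_ definition above) =====
theorem lookupAtJunction_spec : Claim_equal_lookupAtJunction := by
  intro length w b _
  unfold Spec_lookupAtJunction lookupAtJunction lookupAtJunction_alt
  split_ifs with h
  · rfl
  · exact pvLoop_eq length w b (by simpa [pvPLength, PySem.Str.len, pvPattern] using not_lt.mp h)
      _ (fun i hi => by
        have := (PySem.List.mem_pyRange_one).mp hi
        omega) 0 0
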